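-- pv_equiv track=rewrite | github.com/jeiwils/RAG_lab | src/visualisations/curves.py | _first_hit_rank
-- ===== SOURCE A (Python) =====
-- from typing import Dict, Iterable, List, Tuple
--
-- def _first_hit_rank(selected_ids: Iterable[str], gold_ids: List[str]) -> int | None:
--     if not gold_ids:
--         return None
--     for i, sid in enumerate(selected_ids, start=1):
--         for gid in gold_ids:
--             if sid == gid or sid.startswith(gid + "__"):
--                 return i
--     return None
-- ===== SOURCE B (Python) =====
-- def _first_hit_rank(selected_ids, gold_ids):
--     if not gold_ids:
--         return None
--     gold = set(gold_ids)
--     for rank, sid in enumerate(selected_ids, start=1):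
--         if sid in gold:
--             return rank
--         for i in range(len(sid) - 1):
--             if sid[i] == '_' and sid[i + 1] == '_' and sid[:i] in gold:
--                 return rank
--     return None
-- ===== Notes on version B (the rewrite author's own statement) =====
-- stated objective: alternative
-- what changed: The inner loop no longer scans gold_ids with equality/startswith per sid; instead gold_ids is indexed once as a set and each sid's '__'-boundary prefixes (sid[:i] at every '__' occurrence, plus sid itself) are probed against it.
import Mathlib
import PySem

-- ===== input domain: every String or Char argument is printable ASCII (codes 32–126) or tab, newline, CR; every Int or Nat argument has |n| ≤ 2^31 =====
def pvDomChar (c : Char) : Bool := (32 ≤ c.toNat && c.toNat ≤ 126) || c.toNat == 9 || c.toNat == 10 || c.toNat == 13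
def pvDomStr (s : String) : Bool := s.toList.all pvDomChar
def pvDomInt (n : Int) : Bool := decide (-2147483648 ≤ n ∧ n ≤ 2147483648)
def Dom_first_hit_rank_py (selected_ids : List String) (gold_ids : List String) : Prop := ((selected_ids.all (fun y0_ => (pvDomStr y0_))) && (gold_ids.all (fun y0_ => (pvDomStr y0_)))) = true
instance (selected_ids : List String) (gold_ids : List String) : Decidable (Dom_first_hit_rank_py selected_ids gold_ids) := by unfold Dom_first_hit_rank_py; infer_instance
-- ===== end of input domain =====

-- B replaces the inner scan of gold_ids (equality / startswith(gid+"__")) by probing the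
-- '__'-boundary prefixes of each sid against a set built once from gold_ids (objective: alternative).

-- ===== PORT A =====
-- inner 'for gid in gold_ids: if sid == gid or sid.startswith(gid + "__"): return i' as List.any
def pvAgo (gold : List String) : List String → Int → Option Int
  | [], _ => none
  | sid :: rest, i =>
    if gold.any (fun gid =>
        sid.toList == gid.toList ||
        PySem.Chars.startswith sid.toList (gid.toList ++ ['_', '_'])) then
      some i
    else pvAgo gold rest (i + 1)

def first_hit_rank_py (selected_ids : List String) (gold_ids : List String) : Option Int :=
  if gold_ids.isEmpty then none
  else pvAgo gold_ids selected_ids 1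

-- ===== PORT B =====
-- 'sid in gold' and the inner 'for i in range(len(sid)-1)' probe of sid[:i] against the set
def pvBhit (gold : PySem.Set (List Char)) (cs : List Char) : Bool :=
  PySem.Set.contains gold cs ||
  (List.range (cs.length - 1)).any (fun i =>
    (cs[i]? == some '_') && (cs[i + 1]? == some '_') &&
    PySem.Set.contains gold (cs.take i))

def pvBgo (gold : PySem.Set (List Char)) : List String → Int → Option Int
  | [], _ => none
  | sid :: rest, i =>
    if pvBhit gold sid.toList then some i else pvBgo gold rest (i + 1)

def first_hit_rank_py_alt (selected_ids : List String) (gold_ids : List String) : Option Int :=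
  if gold_ids.isEmpty then none
  else pvBgo (PySem.Set.ofList (gold_ids.map String.toList)) selected_ids 1

-- ===== PRECONDITION & SPEC =====
def Spec_first_hit_rank_py (selected_ids : List String) (gold_ids : List String) (out : Option Int) : Prop := out = first_hit_rank_py_alt selected_ids gold_ids
instance (selected_ids : List String) (gold_ids : List String) (out : Option Int) : Decidable (Spec_first_hit_rank_py selected_ids gold_ids out) := by unfold Spec_first_hit_rank_py; infer_instance

-- ===== CLAIM (what is proved, stated in full; the proofs are below) =====
def Claim_equal_first_hit_rank_py : Prop := ∀ (selected_ids : List String) (gold_ids : List String), Dom_first_hit_rank_py selected_ids gold_ids → Spec_first_hit_rank_py selected_ids gold_ids (first_hit_rank_py selected_ids gold_ids)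

-- ===== LEMMAS AND PROOFS =====

-- (g ++ "__") is a prefix of cs  ↔  some position i carries "__" with cs[:i] = g
theorem pv_prefix_iff (cs g : List Char) :
    (g ++ ['_', '_']) <+: cs ↔
    ∃ i, i ∈ List.range (cs.length - 1) ∧ cs[i]? = some '_' ∧ cs[i + 1]? = some '_' ∧ cs.take i = g := by
  constructor
  · rintro ⟨t, ht⟩
    subst ht
    refine ⟨g.length, ?_, ?_, ?_, ?_⟩
    · simp [List.mem_range]
    · rw [List.append_assoc, List.getElem?_append_right (by omega)]
      simp
    · rw [List.append_assoc, List.getElem?_append_right (by omega)]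
      simp
    · rw [List.append_assoc, List.take_left]
  · rintro ⟨i, hi, h1, h2, rfl⟩
    simp only [List.mem_range] at hi
    have hlt : i < cs.length := by omega
    have hlt2 : i + 1 < cs.length := by omega
    have e1 : cs[i] = '_' := by simpa [List.getElem?_eq_getElem hlt] using h1
    have e2 : cs[i + 1] = '_' := by simpa [List.getElem?_eq_getElem hlt2] using h2
    refine ⟨cs.drop (i + 2), ?_⟩
    conv_rhs => rw [← List.take_append_drop i cs]
    rw [List.drop_eq_getElem_cons hlt, List.drop_eq_getElem_cons hlt2, e1, e2]
    simp

-- per-sid: A's inner any over gold equals B's set probe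
theorem pv_hit_eq (cs : List Char) (gold : List String) :
    gold.any (fun gid =>
        cs == gid.toList ||
        PySem.Chars.startswith cs (gid.toList ++ ['_', '_'])) =
    pvBhit (PySem.Set.ofList (gold.map String.toList)) cs := by
  rw [Bool.eq_iff_iff]
  simp only [List.any_eq_true, Bool.or_eq_true, Bool.and_eq_true, beq_iff_eq,
    PySem.Chars.startswith_iff, pv_prefix_iff, pvBhit, PySem.Set.contains_iff,
    PySem.Set.mem_ofList, List.mem_map]
  constructor
  · rintro ⟨gid, hg, h | ⟨i, hi, h1, h2, hident⟩⟩
    · exact Or.inl ⟨gid, hg, h.symm⟩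
    · exact Or.inr ⟨i, hi, ⟨h1, h2⟩, gid, hg, hident.symm⟩
  · rintro (⟨gid, hg, h⟩ | ⟨i, hi, ⟨h1, h2⟩, gid, hg, h⟩)
    · exact ⟨gid, hg, Or.inl h.symm⟩
    · exact ⟨gid, hg, Or.inr ⟨i, hi, h1, h2, h.symm⟩⟩

theorem pv_go_eq (gold : List String) (sel : List String) (i : Int) :
    pvAgo gold sel i = pvBgo (PySem.Set.ofList (gold.map String.toList)) sel i := by
  induction sel generalizing i with
  | nil => rfl
  | cons sid rest ih =>
    simp only [pvAgo, pvBgo, pv_hit_eq sid.toList gold]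
    split <;> simp [ih]

-- ===== VERDICT (by name: the statement is the Claim_ definition above) =====
theorem first_hit_rank_py_spec : Claim_equal_first_hit_rank_py := by
  intro sel gold _
  unfold Spec_first_hit_rank_py first_hit_rank_py first_hit_rank_py_alt
  split
  · rfl
  · exact pv_go_eq gold sel 1
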